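-- pv_equiv track=rewrite | github.com/gtrivedi88/content-editorial-assistant | scripts/gap_analysis.py | _compute_per_letter_coverage
-- ===== SOURCE A (Python) =====
-- from typing import Any, Dict, List, Set, Tuple
--
-- def _compute_per_letter_coverage(
--     headwords: List[Dict[str, Any]], existing_terms: Set[str],
-- ) -> Dict[str, Dict[str, int]]:
--     """Compute coverage breakdown per starting letter.
--
--     Args:
--         headwords: All extracted headwords.
--         existing_terms: Set of existing lowercase terms.
--
--     Returns:
--         Dict mapping letter to {total, covered, missing} counts.
--     """
--     by_letter: Dict[str, Dict[str, int]] = {}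
--
--     for entry in headwords:
--         letter = entry["term"][0].upper() if entry["term"] else "?"
--         if letter not in by_letter:
--             by_letter[letter] = {"total": 0, "covered": 0, "missing": 0}
--         by_letter[letter]["total"] += 1
--         if entry["term"].lower() in existing_terms:
--             by_letter[letter]["covered"] += 1
--         else:
--             by_letter[letter]["missing"] += 1
--
--     return dict(sorted(by_letter.items()))
-- ===== SOURCE B (Python) =====
-- from typing import Any, Dict, List, Set
-- from collections import defaultdict
--
-- def _compute_per_letter_coverage(
--     headwords: List[Dict[str, Any]], existing_terms: Set[str],
-- ) -> Dict[str, Dict[str, int]]: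
--     """Group terms by starting letter first, then aggregate each group's stats."""
--     groups: Dict[str, List[str]] = defaultdict(list)
--     for entry in headwords:
--         term = entry["term"]
--         groups[term[0].upper() if term else "?"].append(term)
--
--     result: Dict[str, Dict[str, int]] = {}
--     for letter, terms in sorted(groups.items()):
--         covered = sum(t.lower() in existing_terms for t in terms)
--         result[letter] = {
--             "total": len(terms),
--             "covered": covered,
--             "missing": len(terms) - covered,
--         }
--     return result
-- ===== Notes on version B (the rewrite author's own statement) =====
-- stated objective: alternative
-- what changed: B replaces A's single incremental counter-update pass with two differently-shaped phases: one pass groups terms into a letter -> list-of-terms index, then a second pass over the sorted groups computes each letter's total/covered/missing by aggregating its list.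
import Mathlib
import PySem

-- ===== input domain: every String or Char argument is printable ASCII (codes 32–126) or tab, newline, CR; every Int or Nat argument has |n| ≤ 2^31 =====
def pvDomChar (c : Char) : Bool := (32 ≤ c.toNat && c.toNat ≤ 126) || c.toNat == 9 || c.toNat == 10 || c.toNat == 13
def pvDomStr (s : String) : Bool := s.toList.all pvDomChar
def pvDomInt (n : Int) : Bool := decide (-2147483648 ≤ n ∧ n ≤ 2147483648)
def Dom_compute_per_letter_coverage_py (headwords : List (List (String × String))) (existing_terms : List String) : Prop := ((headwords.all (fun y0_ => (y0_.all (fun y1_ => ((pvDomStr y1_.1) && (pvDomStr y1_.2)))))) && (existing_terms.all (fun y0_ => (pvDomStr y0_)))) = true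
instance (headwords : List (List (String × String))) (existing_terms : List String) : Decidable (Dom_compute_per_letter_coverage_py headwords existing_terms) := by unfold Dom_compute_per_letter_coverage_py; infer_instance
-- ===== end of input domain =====

-- B regroups the work: one pass builds letter → list-of-terms, a second pass aggregates each
-- group into its {total, covered, missing} stats (objective: alternative decomposition, same cost).

-- ===== PORT A =====
-- `entry["term"][0].upper() if entry["term"] else "?"` — term[0] is the head char (term nonempty)
def pvLetter (term : String) : String :=
  match term.toList with
  | [] => "?"
  | c :: _ => PySem.Str.upper (String.ofList [c])

def compute_per_letter_coverage_py (headwords : List (List (String × String))) (existing_terms : List String) : List (String × List (String × Int)) :=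
  let by_letter : PySem.Dict String (PySem.Dict String Int) :=
    headwords.foldl (fun d entry =>
      -- entry["term"]: KeyError when the key is absent — excluded by Pre_; default "" unreachable there
      let term := (PySem.Dict.mk entry).getD "term" ""
      let letter := pvLetter term
      let d := if d.contains letter then d
               else d.insert letter (PySem.Dict.ofList [("total", 0), ("covered", 0), ("missing", 0)])
      -- by_letter[letter]["total"] += 1 (key present, so the modify defaults are unreachable)
      let d := d.modify letter PySem.Dict.empty (fun m => m.modify "total" 0 (· + 1))
      if PySem.Set.contains existing_terms (PySem.Str.lower term) then
        d.modify letter PySem.Dict.empty (fun m => m.modify "covered" 0 (· + 1))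
      else
        d.modify letter PySem.Dict.empty (fun m => m.modify "missing" 0 (· + 1)))
      PySem.Dict.empty
  -- sorted(by_letter.items()): keys are distinct, so tuple comparison only ever reaches the key
  (PySem.List.sorted by_letter.items (fun p => p.1) false).map (fun p => (p.1, p.2.items))

-- ===== PORT B =====
def compute_per_letter_coverage_py_alt (headwords : List (List (String × String))) (existing_terms : List String) : List (String × List (String × Int)) :=
  -- phase 1: group terms by starting letter (defaultdict(list))
  let groups : PySem.Dict String (List String) :=
    headwords.foldl (fun g entry =>
      let term := (PySem.Dict.mk entry).getD "term" ""
      g.modify (pvLetter term) [] (· ++ [term]))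
      PySem.Dict.empty
  -- phase 2: aggregate each group's stats, in sorted key order (fresh keys: result appends)
  (PySem.List.sorted groups.items (fun p => p.1) false).foldl (fun res p =>
    let covered := p.2.foldl (fun a t => a + (if PySem.Set.contains existing_terms (PySem.Str.lower t) then 1 else 0)) (0 : Int)
    res ++ [(p.1, [("total", (p.2.length : Int)), ("covered", covered), ("missing", (p.2.length : Int) - covered)])]) []

-- ===== PRECONDITION & SPEC =====
-- Pre_ excludes exactly the entries without a "term" key, on which Python A raises KeyError.
def Pre_compute_per_letter_coverage_py (headwords : List (List (String × String))) (existing_terms : List String) : Prop :=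
  ∀ entry ∈ headwords, (PySem.Dict.mk entry).contains "term" = true
instance (headwords : List (List (String × String))) (existing_terms : List String) : Decidable (Pre_compute_per_letter_coverage_py headwords existing_terms) := by unfold Pre_compute_per_letter_coverage_py; infer_instance

def pvWitness_compute_per_letter_coverage_py : (List (List (String × String))) × List String :=
  ([[("term", "Apple")], [("term", "ant")], [("term", "")]], ["apple"])

def Spec_compute_per_letter_coverage_py (headwords : List (List (String × String))) (existing_terms : List String) (out : List (String × List (String × Int))) : Prop := out = compute_per_letter_coverage_py_alt headwords existing_terms
instance (headwords : List (List (String × String))) (existing_terms : List String) (out : List (String × List (String × Int))) : Decidable (Spec_compute_per_letter_coverage_py headwords existing_terms out) := by unfold Spec_compute_per_letter_coverage_py; infer_instance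

-- ===== CLAIM (what is proved, stated in full; the proofs are below) =====
def Claim_equal_compute_per_letter_coverage_py : Prop := ∀ (headwords : List (List (String × String))) (existing_terms : List String), Dom_compute_per_letter_coverage_py headwords existing_terms → Pre_compute_per_letter_coverage_py headwords existing_terms → Spec_compute_per_letter_coverage_py headwords existing_terms (compute_per_letter_coverage_py headwords existing_terms)

-- ===== LEMMAS AND PROOFS =====

-- the number of covered terms in a group, in exactly B's foldl shape
def pvCov (ex : List String) (ts : List String) : Int :=
  ts.foldl (fun a t => a + (if PySem.Set.contains ex (PySem.Str.lower t) then 1 else 0)) 0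

-- the stats dict A keeps for a group with term list ts
def pvStats (ex : List String) (ts : List String) : PySem.Dict String Int :=
  PySem.Dict.mk [("total", (ts.length : Int)), ("covered", pvCov ex ts), ("missing", (ts.length : Int) - pvCov ex ts)]

def pvF (ex : List String) (p : String × List String) : String × PySem.Dict String Int :=
  (p.1, pvStats ex p.2)

lemma pvCov_append (ex ts : List String) (t : String) :
    pvCov ex (ts ++ [t]) = pvCov ex ts + (if PySem.Set.contains ex (PySem.Str.lower t) then 1 else 0) := by
  unfold pvCov
  rw [List.foldl_append]
  simp

lemma insert_insert_self {ν : Type} (d : PySem.Dict String ν) (k : String) (v w : ν) :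
    (d.insert k v).insert k w = d.insert k w := by
  apply PySem.Dict.ext
  by_cases h : d.contains k = true
  · rw [PySem.Dict.items_insert_of_contains _ _ h,
        PySem.Dict.items_insert_of_contains _ _ (PySem.Dict.contains_insert_self d k v),
        PySem.Dict.items_insert_of_contains _ _ h, List.map_map]
    apply List.map_congr_left
    intro p _
    by_cases hp : p.1 = k <;> simp [hp]
  · have h' : d.contains k = false := by simpa using h
    rw [PySem.Dict.items_insert_of_not_contains _ _ h',
        PySem.Dict.items_insert_of_contains _ _ (PySem.Dict.contains_insert_self d k v),
        PySem.Dict.items_insert_of_not_contains _ _ h']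
    have hmem : ∀ p ∈ d.items, (p.1 == k) = false := by
      intro p hp
      have : k ∉ d.keys := by
        intro hk
        rw [← PySem.Dict.contains_iff_mem_keys] at hk
        simp [hk] at h'
      simp only [beq_eq_false_iff_ne, ne_eq]
      intro he
      exact this (he ▸ PySem.Dict.mem_keys_of_mem_items d hp)
    rw [List.map_append]
    congr 1
    · conv_rhs => rw [← List.map_id d.items]
      apply List.map_congr_left
      intro p hp
      simp [hmem p hp]
    · simp

lemma keys_map_pvF (ex : List String) (l : List (String × List String)) :
    (l.map (pvF ex)).map (·.1) = l.map (·.1) := by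
  simp [pvF]

lemma modify_eq_insert {ν : Type} (d : PySem.Dict String ν) (k : String) (d0 : ν) (f : ν → ν) :
    d.modify k d0 f = d.insert k (f (d.getD k d0)) := rfl

-- updating A's running stats dict is pvStats of the extended group
lemma stats_step (ex ts : List String) (term : String) :
    (if PySem.Set.contains ex (PySem.Str.lower term) then
       ((pvStats ex ts).modify "total" 0 (· + 1)).modify "covered" 0 (· + 1)
     else ((pvStats ex ts).modify "total" 0 (· + 1)).modify "missing" 0 (· + 1))
    = pvStats ex (ts ++ [term]) := by
  have h1 : ∀ n cv mi : Int, ((PySem.Dict.mk [("total", n), ("covered", cv), ("missing", mi)]).modify "total" 0 (· + 1))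
      = PySem.Dict.mk [("total", n + 1), ("covered", cv), ("missing", mi)] := fun _ _ _ => rfl
  have h2 : ∀ n cv mi : Int, ((PySem.Dict.mk [("total", n), ("covered", cv), ("missing", mi)]).modify "covered" 0 (· + 1))
      = PySem.Dict.mk [("total", n), ("covered", cv + 1), ("missing", mi)] := fun _ _ _ => rfl
  have h3 : ∀ n cv mi : Int, ((PySem.Dict.mk [("total", n), ("covered", cv), ("missing", mi)]).modify "missing" 0 (· + 1))
      = PySem.Dict.mk [("total", n), ("covered", cv), ("missing", mi + 1)] := fun _ _ _ => rfl
  unfold pvStats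
  split_ifs with h
  · rw [h1, h2, pvCov_append, if_pos h]
    apply PySem.Dict.ext
    simp
  · rw [h1, h3, pvCov_append, if_neg h]
    apply PySem.Dict.ext
    simp
    push_cast
    omega

-- the first entry of a fresh letter creates pvStats of the singleton group
lemma stats_single (ex : List String) (term : String) :
    (if PySem.Set.contains ex (PySem.Str.lower term) then
       (((PySem.Dict.ofList [("total", 0), ("covered", 0), ("missing", 0)] : PySem.Dict String Int).modify "total" 0 (· + 1)).modify "covered" 0 (· + 1))
     else (((PySem.Dict.ofList [("total", 0), ("covered", 0), ("missing", 0)] : PySem.Dict String Int).modify "total" 0 (· + 1)).modify "missing" 0 (· + 1)))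
    = pvStats ex [term] := by
  have hc : pvCov ex [term] = if PySem.Set.contains ex (PySem.Str.lower term) then 1 else 0 := by
    unfold pvCov; simp
  have hl : (([term] : List String).length : Int) = 1 := by simp
  unfold pvStats
  rw [hc, hl]
  split_ifs with h <;> decide

-- one step of A's loop tracks one step of B's grouping loop through pvF
lemma step_eq (ex : List String) (g : PySem.Dict String (List String)) (hnd : g.keys.Nodup)
    (letter term : String) :
    (let d := PySem.Dict.mk (g.items.map (pvF ex));
     let d := if d.contains letter then d
              else d.insert letter (PySem.Dict.ofList [("total", 0), ("covered", 0), ("missing", 0)])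
     let d := d.modify letter PySem.Dict.empty (fun m => m.modify "total" 0 (· + 1))
     if PySem.Set.contains ex (PySem.Str.lower term) then
       d.modify letter PySem.Dict.empty (fun m => m.modify "covered" 0 (· + 1))
     else
       d.modify letter PySem.Dict.empty (fun m => m.modify "missing" 0 (· + 1)))
    = PySem.Dict.mk ((g.modify letter [] (· ++ [term])).items.map (pvF ex)) := by
  have hkeys : (PySem.Dict.mk (g.items.map (pvF ex))).keys = g.keys := by
    simp only [PySem.Dict.keys]
    exact keys_map_pvF ex g.items
  have hndd : (PySem.Dict.mk (g.items.map (pvF ex))).keys.Nodup := by rw [hkeys]; exact hnd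
  have hcont : (PySem.Dict.mk (g.items.map (pvF ex))).contains letter = g.contains letter := by
    rw [PySem.Dict.contains_eq_decide_mem_keys, PySem.Dict.contains_eq_decide_mem_keys, hkeys]
  simp only [modify_eq_insert]
  by_cases hc : g.contains letter = true
  · -- the letter already has a group
    cases hv : g.get? letter with
    | none =>
      rw [PySem.Dict.get?_eq_none_iff_contains] at hv
      rw [hv] at hc; exact absurd hc (by simp)
    | some ts =>
      have hts : g.getD letter [] = ts := PySem.Dict.getD_of_get?_eq_some _ _ hv
      have hmem : (letter, ts) ∈ g.items := PySem.Dict.mem_items_of_get?_eq_some _ hv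
      have hmemF : (letter, pvStats ex ts) ∈ (PySem.Dict.mk (g.items.map (pvF ex))).items := by
        show _ ∈ g.items.map (pvF ex)
        exact List.mem_map.mpr ⟨(letter, ts), hmem, rfl⟩
      have hgd : (PySem.Dict.mk (g.items.map (pvF ex))).getD letter PySem.Dict.empty = pvStats ex ts :=
        PySem.Dict.getD_of_mem_items _ hmemF hndd _
      rw [if_pos (hcont.trans hc), hgd, PySem.Dict.getD_insert_self, insert_insert_self]
      have hbranch := stats_step ex ts term
      simp only [modify_eq_insert] at hbranch
      split_ifs at hbranch ⊢ with hb
      all_goals (rw [hbranch, hts]; (try simp only [insert_insert_self]))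
      all_goals
        apply PySem.Dict.ext
        rw [PySem.Dict.items_insert_of_contains _ _ (hcont.trans hc)]
        show _ = (g.insert letter (ts ++ [term])).items.map (pvF ex)
        rw [PySem.Dict.items_insert_of_contains _ _ hc]
        show (g.items.map (pvF ex)).map _ = _
        rw [List.map_map, List.map_map]
        apply List.map_congr_left
        intro p _
        by_cases hp : p.1 = letter <;> simp [pvF, hp]
  · -- fresh letter
    have hc' : g.contains letter = false := by simpa using hc
    have hcd : (PySem.Dict.mk (g.items.map (pvF ex))).contains letter = false := hcont.trans hc'
    rw [if_neg (show ¬((PySem.Dict.mk (g.items.map (pvF ex))).contains letter = true) from by simp [hcd]),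
        PySem.Dict.getD_insert_self, insert_insert_self, PySem.Dict.getD_insert_self, insert_insert_self]
    have hts : g.getD letter [] = [] := PySem.Dict.getD_of_not_contains _ _ hc'
    have hbranch := stats_single ex term
    simp only [modify_eq_insert] at hbranch
    split_ifs at hbranch ⊢ with hb
    all_goals (rw [hbranch, hts]; (try simp only [insert_insert_self]))
    all_goals
      apply PySem.Dict.ext
      rw [PySem.Dict.items_insert_of_not_contains _ _ hcd]
      show _ = (g.insert letter ([] ++ [term])).items.map (pvF ex)
      rw [PySem.Dict.items_insert_of_not_contains _ _ hc']
      simp [pvF]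

lemma fold_tracks (ex : List String) (hw : List (List (String × String)))
    (g : PySem.Dict String (List String)) (hnd : g.keys.Nodup) :
    hw.foldl (fun d entry =>
      let term := (PySem.Dict.mk entry).getD "term" ""
      let letter := pvLetter term
      let d := if d.contains letter then d
               else d.insert letter (PySem.Dict.ofList [("total", 0), ("covered", 0), ("missing", 0)])
      let d := d.modify letter PySem.Dict.empty (fun m => m.modify "total" 0 (· + 1))
      if PySem.Set.contains ex (PySem.Str.lower term) then
        d.modify letter PySem.Dict.empty (fun m => m.modify "covered" 0 (· + 1))
      else
        d.modify letter PySem.Dict.empty (fun m => m.modify "missing" 0 (· + 1)))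
      (PySem.Dict.mk (g.items.map (pvF ex)))
    = PySem.Dict.mk ((hw.foldl (fun g entry =>
        let term := (PySem.Dict.mk entry).getD "term" ""
        g.modify (pvLetter term) [] (· ++ [term])) g).items.map (pvF ex)) := by
  induction hw generalizing g with
  | nil => rfl
  | cons entry rest ih =>
    simp only [List.foldl_cons]
    have hstep := step_eq ex g hnd (pvLetter ((PySem.Dict.mk entry).getD "term" ""))
      ((PySem.Dict.mk entry).getD "term" "")
    simp only [] at hstep ⊢
    rw [hstep]
    apply ih
    rw [modify_eq_insert]
    exact PySem.Dict.nodup_keys_insert _ _ _ hnd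

lemma insertBy_map {α β : Type} (f : α → β) (bef : α → α → Bool) (bef' : β → β → Bool)
    (h : ∀ a b, bef' (f a) (f b) = bef a b) (x : α) (ys : List α) :
    (PySem.List.insertBy bef x ys).map f = PySem.List.insertBy bef' (f x) (ys.map f) := by
  induction ys with
  | nil => rfl
  | cons y ys ih =>
    show (if bef x y then x :: y :: ys else y :: PySem.List.insertBy bef x ys).map f
      = if bef' (f x) (f y) then f x :: f y :: ys.map f
        else f y :: PySem.List.insertBy bef' (f x) (ys.map f)
    rw [h]
    split <;> simp [ih]

lemma sorted_map_key_pres {α β : Type} (f : α → β) (k1 : α → String) (k2 : β → String)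
    (h : ∀ a, k2 (f a) = k1 a) (l : List α) :
    PySem.List.sorted (l.map f) k2 false = (PySem.List.sorted l k1 false).map f := by
  rw [PySem.List.sorted_eq_foldl_insertBy, PySem.List.sorted_eq_foldl_insertBy]
  have main : ∀ (l : List α) (acc : List α),
      (l.map f).foldl (fun acc x => PySem.List.insertBy (fun a b => decide (k2 a < k2 b)) x acc) (acc.map f)
      = (l.foldl (fun acc x => PySem.List.insertBy (fun a b => decide (k1 a < k1 b)) x acc) acc).map f := by
    intro l
    induction l with
    | nil => intro acc; rfl
    | cons x xs ih =>
      intro acc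
      have := insertBy_map f (fun a b => decide (k1 a < k1 b)) (fun a b => decide (k2 a < k2 b))
        (by intro a b; simp only []; rw [h, h]) x acc
      simp only [List.map_cons, List.foldl_cons, ← this, ih]
  simpa using main l []

lemma foldl_append_map {α β : Type} (f : α → β) (l : List α) (acc : List β) :
    l.foldl (fun r x => r ++ [f x]) acc = acc ++ l.map f := by
  induction l generalizing acc with
  | nil => simp
  | cons x xs ih => simp [ih]

-- ===== VERDICT (by name: the statement is the Claim_ definition above) =====
theorem compute_per_letter_coverage_py_spec : Claim_equal_compute_per_letter_coverage_py := by
  intro hw ex _ _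
  unfold Spec_compute_per_letter_coverage_py
  unfold compute_per_letter_coverage_py compute_per_letter_coverage_py_alt
  simp only []
  have h0 := fold_tracks ex hw PySem.Dict.empty PySem.Dict.nodup_keys_empty
  rw [show (PySem.Dict.empty : PySem.Dict String (PySem.Dict String Int))
      = PySem.Dict.mk (((PySem.Dict.empty : PySem.Dict String (List String))).items.map (pvF ex)) from rfl,
    h0]
  generalize (hw.foldl (fun g entry =>
      let term := (PySem.Dict.mk entry).getD "term" ""
      g.modify (pvLetter term) [] (· ++ [term])) (PySem.Dict.empty : PySem.Dict String (List String))).items = l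
  show (PySem.List.sorted (l.map (pvF ex)) (fun p => p.1) false).map (fun p => (p.1, p.2.items)) = _
  rw [sorted_map_key_pres (pvF ex) (fun p => p.1) (fun p => p.1) (fun a => rfl) l,
    foldl_append_map, List.map_map]
  simp only [List.nil_append]
  apply List.map_congr_left
  intro p _
  rfl
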